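-- pv_equiv track=rewrite | github.com/pappubishwas/GeeksForGeeks | day42.py | Count
-- ===== SOURCE A (Python) =====
-- def Count(matrix):
--     n, m = len(matrix), len(matrix[0])
--     total_count = 0
--
--     for i in range(n):
--         for j in range(m):
--             count = 0
--
--             if matrix[i][j] == 1:
--                 if i - 1 >= 0 and matrix[i - 1][j] == 0:
--                     count += 1
--                 if i + 1 < n and matrix[i + 1][j] == 0:
--                     count += 1
--                 if j - 1 >= 0 and matrix[i][j - 1] == 0:
--                     count += 1
--                 if j + 1 < m and matrix[i][j + 1] == 0:
--                     count += 1
--                 if i - 1 >= 0 and j - 1 >= 0 and matrix[i - 1][j - 1] == 0: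
--                     count += 1
--                 if i + 1 < n and j + 1 < m and matrix[i + 1][j + 1] == 0:
--                     count += 1
--                 if i + 1 < n and j - 1 >= 0 and matrix[i + 1][j - 1] == 0:
--                     count += 1
--                 if i - 1 >= 0 and j + 1 < m and matrix[i - 1][j + 1] == 0:
--                     count += 1
--
--             if count != 0 and count % 2 == 0:
--                 total_count += 1
--
--     return total_count
-- ===== SOURCE B (Python) =====
-- def Count(matrix):
--     n, m = len(matrix), len(matrix[0])
--     offs = [(-1, -1), (-1, 0), (-1, 1), (0, -1), (0, 1), (1, -1), (1, 0), (1, 1)]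
--     # Pass 1 (scatter): every zero cell adds 1 to a counter for each of its 8 neighbor positions.
--     zc = {}
--     for i in range(n):
--         for j in range(m):
--             if matrix[i][j] == 0:
--                 for di, dj in offs:
--                     k = (i + di, j + dj)
--                     zc[k] = zc.get(k, 0) + 1
--     # Pass 2 (gather): a 1-cell is counted when its accumulated zero-neighbor total is even and nonzero.
--     total = 0
--     for i in range(n):
--         for j in range(m):
--             if matrix[i][j] == 1:
--                 c = zc.get((i, j), 0)
--                 if c != 0 and c % 2 == 0:
--                     total += 1
--     return total
-- ===== Notes on version B (the rewrite author's own statement) =====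
-- stated objective: alternative
-- what changed: B inverts the data flow: instead of A's per-cell gather over 8 bounds-checked neighbor reads, B makes a first pass that scatters +1 from every zero cell into a dict counter keyed by each of its 8 neighbor positions (no bounds checks), then a second pass that reads each 1-cell's accumulated zero-neighbor count from the dict.
import Mathlib
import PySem

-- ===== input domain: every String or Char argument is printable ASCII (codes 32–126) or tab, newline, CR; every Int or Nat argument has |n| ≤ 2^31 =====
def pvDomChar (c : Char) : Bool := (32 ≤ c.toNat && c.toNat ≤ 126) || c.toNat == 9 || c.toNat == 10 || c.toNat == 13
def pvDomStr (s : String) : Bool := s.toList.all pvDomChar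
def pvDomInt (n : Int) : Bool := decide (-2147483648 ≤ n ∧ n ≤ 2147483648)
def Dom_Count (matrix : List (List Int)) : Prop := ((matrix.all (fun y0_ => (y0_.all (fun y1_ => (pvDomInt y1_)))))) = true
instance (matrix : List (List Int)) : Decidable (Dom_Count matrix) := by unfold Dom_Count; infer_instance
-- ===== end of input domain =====

-- B replaces A's per-cell gather over 8 bounds-checked neighbors by a two-pass scatter/gather:
-- pass 1 scatters +1 from every zero cell into a dict counter keyed by neighbor position, pass 2
-- reads each 1-cell's accumulated count (objective: alternative; same asymptotic cost).

-- ===== PORT A =====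
-- matrix[i][j] for Nat indices that A's guards keep in range (exact under Pre_Count)
def pvAtA (matrix : List (List Int)) (i j : Nat) : Int := (matrix.getD i []).getD j 0

def Count (matrix : List (List Int)) : Int :=
  let n := matrix.length
  let m := matrix.headI.length
  (List.range n).foldl (fun total i =>
    (List.range m).foldl (fun total j =>
      let count : Int :=
        if pvAtA matrix i j = 1 then
          (if 1 ≤ i ∧ pvAtA matrix (i-1) j = 0 then 1 else 0)
          + (if i+1 < n ∧ pvAtA matrix (i+1) j = 0 then 1 else 0)
          + (if 1 ≤ j ∧ pvAtA matrix i (j-1) = 0 then 1 else 0)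
          + (if j+1 < m ∧ pvAtA matrix i (j+1) = 0 then 1 else 0)
          + (if 1 ≤ i ∧ 1 ≤ j ∧ pvAtA matrix (i-1) (j-1) = 0 then 1 else 0)
          + (if i+1 < n ∧ j+1 < m ∧ pvAtA matrix (i+1) (j+1) = 0 then 1 else 0)
          + (if i+1 < n ∧ 1 ≤ j ∧ pvAtA matrix (i+1) (j-1) = 0 then 1 else 0)
          + (if 1 ≤ i ∧ j+1 < m ∧ pvAtA matrix (i-1) (j+1) = 0 then 1 else 0)
        else 0
      if count ≠ 0 ∧ count % 2 = 0 then total + 1 else total) total) 0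

-- ===== PORT B =====
-- matrix[i][j] for the in-range Nat loop indices of Source B (same guard discipline as A's accesses)
def pvAtB (matrix : List (List Int)) (i j : Nat) : Int := (matrix.getD i []).getD j 0

def pvOffs : List (Int × Int) := [(-1,-1),(-1,0),(-1,1),(0,-1),(0,1),(1,-1),(1,0),(1,1)]

-- pass 1 of Source B: scatter +1 from every zero cell to each of its 8 neighbor keys
def pvZC (matrix : List (List Int)) : PySem.Dict (Int × Int) Int :=
  (List.range matrix.length).foldl (fun d i =>
    (List.range matrix.headI.length).foldl (fun d j =>
      if pvAtB matrix i j = 0 then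
        pvOffs.foldl (fun d o =>
          let k : Int × Int := ((i : Int) + o.1, (j : Int) + o.2)
          d.insert k (d.getD k 0 + 1)) d
      else d) d) PySem.Dict.empty

def Count_alt (matrix : List (List Int)) : Int :=
  let n := matrix.length
  let m := matrix.headI.length
  let zc := pvZC matrix
  (List.range n).foldl (fun total i =>
    (List.range m).foldl (fun total j =>
      if pvAtB matrix i j = 1 then
        let c := zc.getD ((i : Int), (j : Int)) 0
        if c ≠ 0 ∧ c % 2 = 0 then total + 1 else total
      else total) total) 0

-- ===== PRECONDITION & SPEC =====
-- A raises IndexError on an empty matrix (matrix[0]) and on ragged matrices with a row shorter than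
-- the first row; Pre_Count excludes exactly those inputs.
def Pre_Count (matrix : List (List Int)) : Prop :=
  matrix ≠ [] ∧ ∀ row ∈ matrix, matrix.headI.length ≤ row.length
instance (matrix : List (List Int)) : Decidable (Pre_Count matrix) := by unfold Pre_Count; infer_instance
def pvWitness_Count : List (List Int) := [[1, 0], [0, 1]]

def Spec_Count (matrix : List (List Int)) (out : Int) : Prop := out = Count_alt matrix
instance (matrix : List (List Int)) (out : Int) : Decidable (Spec_Count matrix out) := by unfold Spec_Count; infer_instance

-- ===== CLAIM (what is proved, stated in full; the proofs are below) =====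
def Claim_equal_Count : Prop := ∀ (matrix : List (List Int)), Dom_Count matrix → Pre_Count matrix → Spec_Count matrix (Count matrix)

-- ===== LEMMAS AND PROOFS =====

-- the per-cell scatter contribution, as a plain list of target keys
def pvCellL (matrix : List (List Int)) (i j : Nat) : List (Int × Int) :=
  if pvAtA matrix i j = 0 then pvOffs.map (fun o => ((i : Int) + o.1, (j : Int) + o.2)) else []

-- the whole scatter stream of pass 1
def pvS (matrix : List (List Int)) : List (Int × Int) :=
  (List.range matrix.length).flatMap (fun i =>
    (List.range matrix.headI.length).flatMap (fun j => pvCellL matrix i j))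

lemma pv_fold_flat {α : Type} (g : α → List (Int × Int)) (ls : List α)
    (d : PySem.Dict (Int × Int) Int) (v : Int × Int) :
    ((ls.foldl (fun d a => (g a).foldl (fun d k => d.insert k (d.getD k 0 + 1)) d) d).getD v 0)
      = d.getD v 0 + ((ls.flatMap g).count v : Int) := by
  induction ls generalizing d with
  | nil => simp
  | cons a tl ih =>
    simp only [List.foldl_cons, List.flatMap_cons, List.count_append]
    rw [ih, PySem.Dict.getD_foldl_insert_add_one]
    push_cast; ring

lemma pv_cell_fold (matrix : List (List Int)) (d : PySem.Dict (Int × Int) Int) (i j : Nat) :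
    (if pvAtB matrix i j = 0 then
        pvOffs.foldl (fun d o =>
          let k : Int × Int := ((i : Int) + o.1, (j : Int) + o.2)
          d.insert k (d.getD k 0 + 1)) d
      else d)
    = (pvCellL matrix i j).foldl (fun d k => d.insert k (d.getD k 0 + 1)) d := by
  have hAB : pvAtB matrix i j = pvAtA matrix i j := rfl
  by_cases h : pvAtA matrix i j = 0
  · rw [if_pos (hAB ▸ h)]
    unfold pvCellL
    rw [if_pos h, List.foldl_map]
  · rw [if_neg (hAB ▸ h)]
    unfold pvCellL
    rw [if_neg h]
    rfl

lemma pv_zc_getD (matrix : List (List Int)) (v : Int × Int) :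
    (pvZC matrix).getD v 0 = ((pvS matrix).count v : Int) := by
  have h1 : pvZC matrix
      = (List.range matrix.length).foldl (fun d i =>
          ((List.range matrix.headI.length).flatMap (fun j => pvCellL matrix i j)).foldl
            (fun d k => d.insert k (d.getD k 0 + 1)) d) PySem.Dict.empty := by
    unfold pvZC
    apply PySem.List.foldl_congr_mem
    intro d i _
    rw [List.foldl_flatMap]
    apply PySem.List.foldl_congr_mem
    intro d' j _
    exact pv_cell_fold matrix d' i j
  rw [h1, pv_fold_flat, PySem.Dict.getD_empty]
  simp [pvS]

lemma pv_cell_count (matrix : List (List Int)) (i j : Nat) (v : Int × Int) :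
    (pvCellL matrix i j).count v =
      (if pvAtA matrix i j = 0 ∧ ((i:Int) + (-1) = v.1 ∧ (j:Int) + (-1) = v.2) then 1 else 0)
    + (if pvAtA matrix i j = 0 ∧ ((i:Int) + (-1) = v.1 ∧ (j:Int) + 0 = v.2) then 1 else 0)
    + (if pvAtA matrix i j = 0 ∧ ((i:Int) + (-1) = v.1 ∧ (j:Int) + 1 = v.2) then 1 else 0)
    + (if pvAtA matrix i j = 0 ∧ ((i:Int) + 0 = v.1 ∧ (j:Int) + (-1) = v.2) then 1 else 0)
    + (if pvAtA matrix i j = 0 ∧ ((i:Int) + 0 = v.1 ∧ (j:Int) + 1 = v.2) then 1 else 0)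
    + (if pvAtA matrix i j = 0 ∧ ((i:Int) + 1 = v.1 ∧ (j:Int) + (-1) = v.2) then 1 else 0)
    + (if pvAtA matrix i j = 0 ∧ ((i:Int) + 1 = v.1 ∧ (j:Int) + 0 = v.2) then 1 else 0)
    + (if pvAtA matrix i j = 0 ∧ ((i:Int) + 1 = v.1 ∧ (j:Int) + 1 = v.2) then 1 else 0) := by
  by_cases h : pvAtA matrix i j = 0 <;>
    (simp only [pvCellL, h, if_pos, true_and, false_and, if_false, pvOffs, List.map_cons,
      List.map_nil, List.count_cons, List.count_nil, Prod.ext_iff, beq_iff_eq]) <;> ring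

lemma pv_sum_range (n : Nat) (f : Nat → Nat) :
    ((List.range n).map f).sum = ∑ i ∈ Finset.range n, f i := by
  induction n with
  | zero => simp
  | succ k ih => simp [List.range_succ, Finset.sum_range_succ, ih]

lemma pv_pick2 (n m : Nat) (P : Nat → Nat → Prop) [∀ i j, Decidable (P i j)] (di dj ti tj : Int) :
    (∑ i ∈ Finset.range n, ∑ j ∈ Finset.range m,
        if P i j ∧ ((i:Int) + di = ti ∧ (j:Int) + dj = tj) then 1 else 0)
    = if 0 ≤ ti - di ∧ ti - di < (n:Int) ∧ 0 ≤ tj - dj ∧ tj - dj < (m:Int)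
         ∧ P (ti - di).toNat (tj - dj).toNat then 1 else 0 := by
  by_cases hin : 0 ≤ ti - di ∧ ti - di < (n:Int) ∧ 0 ≤ tj - dj ∧ tj - dj < (m:Int)
  · obtain ⟨h1, h2, h3, h4⟩ := hin
    set a := (ti - di).toNat with ha
    set b := (tj - dj).toNat with hb
    have haa : (a:Int) + di = ti := by omega
    have hbb : (b:Int) + dj = tj := by omega
    have han : a < n := by omega
    have hbm : b < m := by omega
    rw [Finset.sum_eq_single a]
    · rw [Finset.sum_eq_single b]
      · have e1 : (P a b ∧ ((a:Int) + di = ti ∧ (b:Int) + dj = tj)) ↔ P a b :=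
          ⟨fun h => h.1, fun h => ⟨h, haa, hbb⟩⟩
        rw [if_congr e1 rfl rfl]
        have e2 : (0 ≤ ti - di ∧ ti - di < (n:Int) ∧ 0 ≤ tj - dj ∧ tj - dj < (m:Int) ∧ P a b) ↔ P a b :=
          ⟨fun h => h.2.2.2.2, fun h => ⟨h1, h2, h3, h4, h⟩⟩
        rw [if_congr e2 rfl rfl]
      · intro j _ hne; rw [if_neg]; rintro ⟨-, -, hj⟩; omega
      · intro hno; exact absurd (Finset.mem_range.mpr hbm) hno
    · intro i _ hne
      apply Finset.sum_eq_zero; intro j _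
      rw [if_neg]; rintro ⟨-, hi, -⟩; omega
    · intro hno; exact absurd (Finset.mem_range.mpr han) hno
  · rw [if_neg (by tauto)]
    apply Finset.sum_eq_zero; intro i hi
    apply Finset.sum_eq_zero; intro j hj
    rw [Finset.mem_range] at hi hj
    rw [if_neg]
    rintro ⟨-, hieq, hjeq⟩
    exact hin ⟨by omega, by omega, by omega, by omega⟩

lemma pv_count_S (matrix : List (List Int)) (i0 j0 : Nat)
    (hi : i0 < matrix.length) (hj : j0 < matrix.headI.length) :
    (((pvS matrix).count ((i0 : Int), (j0 : Int)) : Nat) : Int) =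
      (if 1 ≤ i0 ∧ pvAtA matrix (i0-1) j0 = 0 then 1 else 0)
      + (if i0+1 < matrix.length ∧ pvAtA matrix (i0+1) j0 = 0 then 1 else 0)
      + (if 1 ≤ j0 ∧ pvAtA matrix i0 (j0-1) = 0 then 1 else 0)
      + (if j0+1 < matrix.headI.length ∧ pvAtA matrix i0 (j0+1) = 0 then 1 else 0)
      + (if 1 ≤ i0 ∧ 1 ≤ j0 ∧ pvAtA matrix (i0-1) (j0-1) = 0 then 1 else 0)
      + (if i0+1 < matrix.length ∧ j0+1 < matrix.headI.length ∧ pvAtA matrix (i0+1) (j0+1) = 0 then 1 else 0)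
      + (if i0+1 < matrix.length ∧ 1 ≤ j0 ∧ pvAtA matrix (i0+1) (j0-1) = 0 then 1 else 0)
      + (if 1 ≤ i0 ∧ j0+1 < matrix.headI.length ∧ pvAtA matrix (i0-1) (j0+1) = 0 then 1 else 0) := by
  set n := matrix.length
  set m := matrix.headI.length
  have step1 : (pvS matrix).count ((i0 : Int), (j0 : Int))
      = ∑ i ∈ Finset.range n, ∑ j ∈ Finset.range m,
          (pvCellL matrix i j).count ((i0 : Int), (j0 : Int)) := by
    unfold pvS
    rw [List.count_flatMap]
    simp only [Function.comp_def, List.count_flatMap]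
    rw [pv_sum_range]
    apply Finset.sum_congr rfl
    intro i _
    rw [pv_sum_range]
  rw [step1]
  simp only [pv_cell_count, Finset.sum_add_distrib]
  rw [pv_pick2 n m (fun i j => pvAtA matrix i j = 0) (-1) (-1),
      pv_pick2 n m (fun i j => pvAtA matrix i j = 0) (-1) 0,
      pv_pick2 n m (fun i j => pvAtA matrix i j = 0) (-1) 1,
      pv_pick2 n m (fun i j => pvAtA matrix i j = 0) 0 (-1),
      pv_pick2 n m (fun i j => pvAtA matrix i j = 0) 0 1,
      pv_pick2 n m (fun i j => pvAtA matrix i j = 0) 1 (-1),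
      pv_pick2 n m (fun i j => pvAtA matrix i j = 0) 1 0,
      pv_pick2 n m (fun i j => pvAtA matrix i j = 0) 1 1]
  push_cast [apply_ite (fun k : ℕ => (k : ℤ))]
  rw [show ((i0:ℤ) - -1).toNat = i0 + 1 from by omega,
      show ((i0:ℤ) - 0).toNat = i0 from by omega,
      show ((i0:ℤ) - 1).toNat = i0 - 1 from by omega,
      show ((j0:ℤ) - -1).toNat = j0 + 1 from by omega,
      show ((j0:ℤ) - 0).toNat = j0 from by omega,
      show ((j0:ℤ) - 1).toNat = j0 - 1 from by omega]
  have e1 : (0 ≤ (i0:ℤ) - -1 ∧ (i0:ℤ) - -1 < (n:ℤ) ∧ 0 ≤ (j0:ℤ) - -1 ∧ (j0:ℤ) - -1 < (m:ℤ) ∧ pvAtA matrix (i0+1) (j0+1) = 0)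
      ↔ (i0+1 < n ∧ j0+1 < m ∧ pvAtA matrix (i0+1) (j0+1) = 0) := by
    constructor
    · rintro ⟨-, a, -, b, x⟩; exact ⟨by omega, by omega, x⟩
    · rintro ⟨a, b, x⟩; exact ⟨by omega, by omega, by omega, by omega, x⟩
  have e2 : (0 ≤ (i0:ℤ) - -1 ∧ (i0:ℤ) - -1 < (n:ℤ) ∧ 0 ≤ (j0:ℤ) - 0 ∧ (j0:ℤ) - 0 < (m:ℤ) ∧ pvAtA matrix (i0+1) j0 = 0)
      ↔ (i0+1 < n ∧ pvAtA matrix (i0+1) j0 = 0) := by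
    constructor
    · rintro ⟨-, a, -, -, x⟩; exact ⟨by omega, x⟩
    · rintro ⟨a, x⟩; exact ⟨by omega, by omega, by omega, by omega, x⟩
  have e3 : (0 ≤ (i0:ℤ) - -1 ∧ (i0:ℤ) - -1 < (n:ℤ) ∧ 0 ≤ (j0:ℤ) - 1 ∧ (j0:ℤ) - 1 < (m:ℤ) ∧ pvAtA matrix (i0+1) (j0-1) = 0)
      ↔ (i0+1 < n ∧ 1 ≤ j0 ∧ pvAtA matrix (i0+1) (j0-1) = 0) := by
    constructor
    · rintro ⟨-, a, b, -, x⟩; exact ⟨by omega, by omega, x⟩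
    · rintro ⟨a, b, x⟩; exact ⟨by omega, by omega, by omega, by omega, x⟩
  have e4 : (0 ≤ (i0:ℤ) - 0 ∧ (i0:ℤ) - 0 < (n:ℤ) ∧ 0 ≤ (j0:ℤ) - -1 ∧ (j0:ℤ) - -1 < (m:ℤ) ∧ pvAtA matrix i0 (j0+1) = 0)
      ↔ (j0+1 < m ∧ pvAtA matrix i0 (j0+1) = 0) := by
    constructor
    · rintro ⟨-, -, -, b, x⟩; exact ⟨by omega, x⟩
    · rintro ⟨b, x⟩; exact ⟨by omega, by omega, by omega, by omega, x⟩
  have e5 : (0 ≤ (i0:ℤ) - 0 ∧ (i0:ℤ) - 0 < (n:ℤ) ∧ 0 ≤ (j0:ℤ) - 1 ∧ (j0:ℤ) - 1 < (m:ℤ) ∧ pvAtA matrix i0 (j0-1) = 0)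
      ↔ (1 ≤ j0 ∧ pvAtA matrix i0 (j0-1) = 0) := by
    constructor
    · rintro ⟨-, -, b, -, x⟩; exact ⟨by omega, x⟩
    · rintro ⟨b, x⟩; exact ⟨by omega, by omega, by omega, by omega, x⟩
  have e6 : (0 ≤ (i0:ℤ) - 1 ∧ (i0:ℤ) - 1 < (n:ℤ) ∧ 0 ≤ (j0:ℤ) - -1 ∧ (j0:ℤ) - -1 < (m:ℤ) ∧ pvAtA matrix (i0-1) (j0+1) = 0)
      ↔ (1 ≤ i0 ∧ j0+1 < m ∧ pvAtA matrix (i0-1) (j0+1) = 0) := by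
    constructor
    · rintro ⟨a, -, -, b, x⟩; exact ⟨by omega, by omega, x⟩
    · rintro ⟨a, b, x⟩; exact ⟨by omega, by omega, by omega, by omega, x⟩
  have e7 : (0 ≤ (i0:ℤ) - 1 ∧ (i0:ℤ) - 1 < (n:ℤ) ∧ 0 ≤ (j0:ℤ) - 0 ∧ (j0:ℤ) - 0 < (m:ℤ) ∧ pvAtA matrix (i0-1) j0 = 0)
      ↔ (1 ≤ i0 ∧ pvAtA matrix (i0-1) j0 = 0) := by
    constructor
    · rintro ⟨a, -, -, -, x⟩; exact ⟨by omega, x⟩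
    · rintro ⟨a, x⟩; exact ⟨by omega, by omega, by omega, by omega, x⟩
  have e8 : (0 ≤ (i0:ℤ) - 1 ∧ (i0:ℤ) - 1 < (n:ℤ) ∧ 0 ≤ (j0:ℤ) - 1 ∧ (j0:ℤ) - 1 < (m:ℤ) ∧ pvAtA matrix (i0-1) (j0-1) = 0)
      ↔ (1 ≤ i0 ∧ 1 ≤ j0 ∧ pvAtA matrix (i0-1) (j0-1) = 0) := by
    constructor
    · rintro ⟨a, -, b, -, x⟩; exact ⟨by omega, by omega, x⟩
    · rintro ⟨a, b, x⟩; exact ⟨by omega, by omega, by omega, by omega, x⟩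
  rw [if_congr e1 rfl rfl, if_congr e2 rfl rfl, if_congr e3 rfl rfl, if_congr e4 rfl rfl,
      if_congr e5 rfl rfl, if_congr e6 rfl rfl, if_congr e7 rfl rfl, if_congr e8 rfl rfl]
  ring

-- ===== VERDICT =====
theorem Count_spec : Claim_equal_Count := by
  intro matrix hDom hPre
  unfold Spec_Count Count Count_alt
  dsimp only
  apply PySem.List.foldl_congr_mem
  intro acc i hi
  rw [List.mem_range] at hi
  apply PySem.List.foldl_congr_mem
  intro acc2 j hj
  rw [List.mem_range] at hj
  by_cases hc : pvAtA matrix i j = 1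
  · have hB : pvAtB matrix i j = 1 := hc
    rw [if_pos hc, if_pos hB]
    rw [pv_zc_getD, pv_count_S matrix i j hi hj]
  · have hB : ¬ pvAtB matrix i j = 1 := hc
    rw [if_neg hc, if_neg hB]
    simp
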